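-- pv_equiv track=rewrite | github.com/OTOYO1020/ChatDev_Intermediate | WareHouse/128_E_DefaultOrganization_20250427000732/roadwork_manager.py | populate_blocked_intervals
-- ===== SOURCE A (Python) =====
-- def populate_blocked_intervals(roadworks):
--     blocked_intervals = {}
--     for X_i, S_i, T_i in roadworks:
--         if X_i not in blocked_intervals:
--             blocked_intervals[X_i] = []
--         blocked_intervals[X_i].append((S_i, T_i))
--     # Sort and merge intervals for each coordinate
--     for key in blocked_intervals:
--         blocked_intervals[key] = merge_intervals(blocked_intervals[key])
--     return blocked_intervals
--
-- def merge_intervals(intervals):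
--     if not intervals:
--         return []
--     intervals.sort(key=lambda x: x[0])
--     merged = [intervals[0]]
--     for current in intervals[1:]:
--         last = merged[-1]
--         if current[0] <= last[1]:  # Overlapping intervals
--             merged[-1] = (last[0], max(last[1], current[1]))
--         else:
--             merged.append(current)
--     return merged
-- ===== SOURCE B (Python) =====
-- def populate_blocked_intervals(roadworks):
--     # One global stable sort by (coordinate, start), then a single merging sweep;
--     # keys pre-seeded in first-occurrence order so the dict order matches.
--     result = {}
--     for x, _, _ in roadworks:
--         result.setdefault(x, [])
--     for x, s, t in sorted(roadworks, key=lambda r: (r[0], r[1])):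
--         lst = result[x]
--         if lst and s <= lst[-1][1]:
--             lst[-1] = (lst[-1][0], max(lst[-1][1], t))
--         else:
--             lst.append((s, t))
--     return result
-- ===== Notes on version B (the rewrite author's own statement) =====
-- stated objective: alternative
-- what changed: Instead of grouping intervals per coordinate into a dict and then sorting and merging each coordinate's list separately, B sorts the whole roadworks list once by (coordinate, start) and merges intervals in a single sweep over the sorted list, pre-seeding the dict keys in first-occurrence order so the returned dict is identical.
import Mathlib
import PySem

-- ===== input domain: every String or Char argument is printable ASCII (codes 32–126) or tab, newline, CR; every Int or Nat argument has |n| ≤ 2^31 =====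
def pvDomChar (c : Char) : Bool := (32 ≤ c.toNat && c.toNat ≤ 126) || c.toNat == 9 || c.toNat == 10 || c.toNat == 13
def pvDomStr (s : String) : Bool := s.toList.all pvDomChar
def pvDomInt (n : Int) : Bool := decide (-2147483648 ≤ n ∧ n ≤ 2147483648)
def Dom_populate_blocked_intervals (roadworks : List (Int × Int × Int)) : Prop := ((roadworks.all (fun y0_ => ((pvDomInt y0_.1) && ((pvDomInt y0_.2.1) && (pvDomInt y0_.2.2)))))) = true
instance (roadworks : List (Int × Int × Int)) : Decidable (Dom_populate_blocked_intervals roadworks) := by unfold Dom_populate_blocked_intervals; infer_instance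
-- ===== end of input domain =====

-- B groups-then-merges with ONE global stable sort by (coordinate, start) and a single
-- merging sweep, instead of A's per-coordinate sort+merge; same return value (alternative, not faster).

-- ===== PORT A =====
-- body of merge_intervals' for-loop (merged[-1] ported as pyGetD · (-1) ·)
def pvMergeStep (merged : List (Int × Int)) (current : Int × Int) : List (Int × Int) :=
  let last := PySem.List.pyGetD merged (-1) (0, 0)
  if current.1 ≤ last.2 then merged.dropLast ++ [(last.1, max last.2 current.2)]
  else merged ++ [current]

def merge_intervals (intervals : List (Int × Int)) : List (Int × Int) :=
  if intervals = [] then []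
  else
    let s := PySem.List.sorted intervals (fun x => x.1) false
    (PySem.List.slice s (some 1) none).foldl pvMergeStep [PySem.List.pyGetD s 0 (0, 0)]

def populate_blocked_intervals (roadworks : List (Int × Int × Int)) : List (Int × List (Int × Int)) :=
  let bi := roadworks.foldl (fun d r =>
      let d' := if d.contains r.1 then d else d.insert r.1 ([] : List (Int × Int))
      d'.modify r.1 [] (fun l => l ++ [(r.2.1, r.2.2)])) PySem.Dict.empty
  (bi.keys.foldl (fun d k => d.insert k (merge_intervals (d.getD k []))) bi).items

-- ===== PORT B =====
-- body of the sweep's if/else ('if lst and s <= lst[-1][1]')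
def pvSweepStep (lst : List (Int × Int)) (s t : Int) : List (Int × Int) :=
  if lst ≠ [] ∧ s ≤ (PySem.List.pyGetD lst (-1) (0, 0)).2 then
    lst.dropLast ++ [((PySem.List.pyGetD lst (-1) (0, 0)).1, max (PySem.List.pyGetD lst (-1) (0, 0)).2 t)]
  else lst ++ [(s, t)]

def populate_blocked_intervals_alt (roadworks : List (Int × Int × Int)) : List (Int × List (Int × Int)) :=
  let d0 := roadworks.foldl (fun d r => d.setdefault r.1 ([] : List (Int × Int))) PySem.Dict.empty
  let srt := PySem.List.sorted2 roadworks (fun r => r.1) (fun r => r.2.1) false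
  (srt.foldl (fun d r => d.modify r.1 [] (fun lst => pvSweepStep lst r.2.1 r.2.2)) d0).items

-- ===== PRECONDITION & SPEC =====
def Spec_populate_blocked_intervals (roadworks : List (Int × Int × Int)) (out : List (Int × List (Int × Int))) : Prop := out = populate_blocked_intervals_alt roadworks
instance (roadworks : List (Int × Int × Int)) (out : List (Int × List (Int × Int))) : Decidable (Spec_populate_blocked_intervals roadworks out) := by unfold Spec_populate_blocked_intervals; infer_instance

-- ===== CLAIM (what is proved, stated in full; the proofs are below) =====
def Claim_equal_populate_blocked_intervals : Prop := ∀ (roadworks : List (Int × Int × Int)), Dom_populate_blocked_intervals roadworks → Spec_populate_blocked_intervals roadworks (populate_blocked_intervals roadworks)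

-- ===== LEMMAS AND PROOFS =====

-- the strict lexicographic comparison sorted2 uses for key (r.1, r.2.1)
def pvLt2 (a b : Int × Int × Int) : Bool :=
  decide (a.1 < b.1) || (!decide (b.1 < a.1) && decide (a.2.1 < b.2.1))

-- "a ≤ b" in that order
def pvLe2 (a b : Int × Int × Int) : Prop := pvLt2 b a = false

-- the strict comparison sorted uses for key (·.1) on pairs
def pvLt1 (a b : Int × Int) : Bool := decide (a.1 < b.1)

def pvG (r : Int × Int × Int) : Int × Int := (r.2.1, r.2.2)

lemma pvLt2_iff (a b : Int × Int × Int) :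
    pvLt2 a b = true ↔ (a.1 < b.1 ∨ (a.1 = b.1 ∧ a.2.1 < b.2.1)) := by
  simp [pvLt2]; omega

lemma pvLt2_false_iff (a b : Int × Int × Int) :
    pvLt2 a b = false ↔ (b.1 < a.1 ∨ (a.1 = b.1 ∧ ¬ a.2.1 < b.2.1)) := by
  rw [← Bool.not_eq_true, pvLt2_iff]; omega

lemma pvSorted2_eq_foldl (xs : List (Int × Int × Int)) :
    PySem.List.sorted2 xs (fun r => r.1) (fun r => r.2.1) false
      = xs.foldl (fun acc x => PySem.List.insertBy pvLt2 x acc) [] := rfl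

lemma pvSorted1_eq_foldl (xs : List (Int × Int)) :
    PySem.List.sorted xs (fun c => c.1) false
      = xs.foldl (fun acc x => PySem.List.insertBy pvLt1 x acc) [] := rfl

-- insertBy pvLt2 preserves sortedness (pvLe2-pairwise)
lemma pvPairwise_insertBy (x : Int × Int × Int) :
    ∀ l : List (Int × Int × Int), l.Pairwise pvLe2 →
      (PySem.List.insertBy pvLt2 x l).Pairwise pvLe2 := by
  intro l
  induction l with
  | nil => intro _; simp [PySem.List.insertBy, pvLe2]
  | cons y ys ih =>
    intro hp
    rw [List.pairwise_cons] at hp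
    obtain ⟨hy, hys⟩ := hp
    by_cases hxy : pvLt2 x y = true
    · simp only [PySem.List.insertBy, hxy, if_true]
      refine List.Pairwise.cons ?_ (List.Pairwise.cons hy hys)
      intro z hz
      rcases List.mem_cons.mp hz with rfl | hz
      · unfold pvLe2; rw [pvLt2_false_iff]; rw [pvLt2_iff] at hxy; omega
      · have := hy z hz
        unfold pvLe2 at this ⊢
        rw [pvLt2_false_iff] at this ⊢
        rw [pvLt2_iff] at hxy
        omega
    · simp only [PySem.List.insertBy, hxy, Bool.false_eq_true, if_false]
      refine List.Pairwise.cons ?_ (ih hys)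
      intro z hz
      rcases (PySem.List.mem_insertBy pvLt2 x z ys).mp hz with rfl | hz
      · unfold pvLe2; exact Bool.not_eq_true _ ▸ hxy
      · exact hy z hz
  
lemma pvPairwise_sorted2 (xs : List (Int × Int × Int)) :
    (PySem.List.sorted2 xs (fun r => r.1) (fun r => r.2.1) false).Pairwise pvLe2 := by
  rw [pvSorted2_eq_foldl]
  induction xs using List.reverseRecOn with
  | nil => simp
  | append_singleton ys x ih =>
    rw [List.foldl_append, List.foldl_cons, List.foldl_nil]
    exact pvPairwise_insertBy x _ ih

-- inserting an element of another coordinate does not change a coordinate's filtered view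
lemma pvFilter_insertBy_ne (k : Int) (x : Int × Int × Int) (hx : x.1 ≠ k) :
    ∀ a : List (Int × Int × Int),
      (PySem.List.insertBy pvLt2 x a).filter (fun r => r.1 == k)
        = a.filter (fun r => r.1 == k) := by
  intro a
  induction a with
  | nil => simp [PySem.List.insertBy, List.filter, hx]
  | cons y ys ih =>
    by_cases hxy : pvLt2 x y = true
    · simp only [PySem.List.insertBy, hxy, if_true]
      rw [List.filter_cons]
      simp [hx]
    · simp only [PySem.List.insertBy, hxy, Bool.false_eq_true, if_false]
      rw [List.filter_cons, List.filter_cons, ih]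

-- inserting an element of coordinate k into a sorted list inserts pvG x into the filtered view
lemma pvFilter_insertBy_eq (k : Int) (x : Int × Int × Int) (hx : x.1 = k) :
    ∀ a : List (Int × Int × Int), a.Pairwise pvLe2 →
      ((PySem.List.insertBy pvLt2 x a).filter (fun r => r.1 == k)).map pvG
        = PySem.List.insertBy pvLt1 (pvG x) ((a.filter (fun r => r.1 == k)).map pvG) := by
  intro a
  induction a with
  | nil => simp [PySem.List.insertBy, List.filter, hx]
  | cons y ys ih =>
    intro hp
    rw [List.pairwise_cons] at hp
    obtain ⟨hy, hys⟩ := hp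
    by_cases hxy : pvLt2 x y = true
    · simp only [PySem.List.insertBy, hxy, if_true]
      by_cases hyk : y.1 = k
      · -- y kept: x goes right before y in the filtered view as well
        have hb : pvLt1 (pvG x) (pvG y) = true := by
          rw [pvLt2_iff] at hxy
          simp [pvLt1, pvG]; omega
        rw [List.filter_cons, List.filter_cons]
        simp only [hx, hyk, beq_self_eq_true, if_true]
        simp [PySem.List.insertBy, hb]
      · -- y dropped and x < y: everything at or after y has coordinate > k, filtered view empty
        have hky : k < y.1 := by
          rw [pvLt2_iff] at hxy; rcases hxy with h | h
          · omega
          · exact absurd (hx ▸ h.1.symm) hyk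
        have htail : ys.filter (fun r => r.1 == k) = [] := by
          rw [List.filter_eq_nil_iff]
          intro z hz
          have := hy z hz
          unfold pvLe2 at this
          rw [pvLt2_false_iff] at this
          simp; omega
        rw [List.filter_cons, List.filter_cons]
        simp only [hx, beq_self_eq_true, if_true]
        have hyk' : (y.1 == k) = false := by simp [hyk]
        simp [hyk', htail, PySem.List.insertBy]
    · simp only [PySem.List.insertBy, hxy, Bool.false_eq_true, if_false]
      by_cases hyk : y.1 = k
      · have hb : pvLt1 (pvG x) (pvG y) = false := by
          rw [Bool.not_eq_true, pvLt2_false_iff] at hxy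
          simp only [pvLt1, pvG, decide_eq_false_iff_not]
          omega
        rw [List.filter_cons, List.filter_cons]
        simp only [hyk, beq_self_eq_true, if_true]
        rw [List.map_cons, List.map_cons, ih hys]
        simp [PySem.List.insertBy, hb]
      · have hyk' : (y.1 == k) = false := by simp [hyk]
        rw [List.filter_cons, List.filter_cons]
        simp only [hyk']
        exact ih hys

-- STABILITY: per coordinate, the global (coord, start)-sort filtered to k equals
-- the start-sort of the filtered originals
lemma pvStable (k : Int) (xs : List (Int × Int × Int)) :
    ((PySem.List.sorted2 xs (fun r => r.1) (fun r => r.2.1) false).filter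
        (fun r => r.1 == k)).map pvG
      = PySem.List.sorted ((xs.filter (fun r => r.1 == k)).map pvG) (fun c => c.1) false := by
  rw [pvSorted1_eq_foldl]
  induction xs using List.reverseRecOn with
  | nil => simp [PySem.List.sorted2]
  | append_singleton ys x ih =>
    have hpw : (ys.foldl (fun acc x => PySem.List.insertBy pvLt2 x acc) []).Pairwise pvLe2 := by
      rw [← pvSorted2_eq_foldl]; exact pvPairwise_sorted2 ys
    rw [pvSorted2_eq_foldl] at ih ⊢
    rw [List.foldl_append, List.foldl_cons, List.foldl_nil,
        List.filter_append, List.map_append, List.foldl_append]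
    by_cases hx : x.1 = k
    · rw [pvFilter_insertBy_eq k x hx _ hpw, ih]
      simp [hx]
    · rw [pvFilter_insertBy_ne k x hx]
      have hx' : (x.1 == k) = false := by simp [hx]
      simp [hx', ih]

-- the two loop bodies agree on a nonempty accumulator, and keep it nonempty
lemma pvFold_steps_agree :
    ∀ (t : List (Int × Int)) (acc : List (Int × Int)), acc ≠ [] →
      t.foldl pvMergeStep acc = t.foldl (fun l c => pvSweepStep l c.1 c.2) acc := by
  intro t
  induction t with
  | nil => intro acc _; rfl
  | cons c cs ih =>
    intro acc hacc
    rw [List.foldl_cons, List.foldl_cons]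
    have hstep : pvMergeStep acc c = pvSweepStep acc c.1 c.2 := by
      unfold pvMergeStep pvSweepStep
      simp only [hacc, ne_eq, not_false_iff, true_and]
    rw [hstep]
    apply ih
    unfold pvSweepStep
    split <;> simp

-- merge_intervals is the sweep fold over the sorted list
lemma pvMerge_eq_sweep (xs : List (Int × Int)) :
    merge_intervals xs
      = (PySem.List.sorted xs (fun c => c.1) false).foldl (fun l c => pvSweepStep l c.1 c.2) [] := by
  by_cases hxs : xs = []
  · subst hxs; rfl
  · have hs : PySem.List.sorted xs (fun c => c.1) false ≠ [] := by
      rw [ne_eq, PySem.List.sorted_eq_nil_iff]; exact hxs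
    obtain ⟨c, t, hct⟩ := List.exists_cons_of_ne_nil hs
    unfold merge_intervals
    rw [if_neg hxs]
    simp only [hct, PySem.List.slice_from_one, List.tail_cons, PySem.List.pyGetD_zero_cons,
      List.foldl_cons]
    have h0 : pvSweepStep [] c.1 c.2 = [c] := by unfold pvSweepStep; simp
    rw [h0]
    exact pvFold_steps_agree t [c] (by simp)

-- ---- dict plumbing ----

lemma pvGet?_mk_append {ν : Type} (pre l2 : List (Int × ν)) (k : Int)
    (h : k ∉ pre.map Prod.fst) :
    (PySem.Dict.mk (pre ++ l2)).get? k = (PySem.Dict.mk l2).get? k := by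
  induction pre with
  | nil => rfl
  | cons p ps ih =>
    simp only [List.map_cons, List.mem_cons, not_or] at h
    rw [List.cons_append, show ((p : Int × ν) :: (ps ++ l2)) = ((p.1, p.2) :: (ps ++ l2)) by rfl,
      PySem.Dict.get?_mk_cons]
    have : (p.1 == k) = false := by simp; exact fun e => h.1 e.symm
    rw [this]
    simp only [Bool.false_eq_true, if_false]
    exact ih h.2

-- a dict with Nodup keys is the map of getD over its keys
lemma pvItems_char {ν : Type} (d : PySem.Dict Int ν) (v0 : ν) (h : d.keys.Nodup) :
    d.items = (d.keys).map (fun k => (k, d.getD k v0)) := by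
  have hk : d.keys = d.items.map Prod.fst := by simp only [PySem.Dict.keys]
  rw [hk, List.map_map]
  symm
  have : ∀ p ∈ d.items, ((fun k => (k, d.getD k v0)) ∘ Prod.fst) p = p := by
    intro p hp
    have hget : d.get? p.1 = some p.2 :=
      PySem.Dict.get?_of_mem_items d (by simpa using hp) h
    simp only [Function.comp]
    rw [PySem.Dict.getD_of_get?_eq_some d v0 hget]
  rw [List.map_congr_left this, List.map_id']

-- the guarded insert-then-append of A's grouping loop is just modify
lemma pvGuard_modify (d : PySem.Dict Int (List (Int × Int))) (k : Int)
    (f : List (Int × Int) → List (Int × Int)) :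
    ((if d.contains k then d else d.insert k []).modify k [] f) = d.modify k [] f := by
  by_cases h : d.contains k = true
  · rw [if_pos h]
  · rw [if_neg h]
    have h' : d.contains k = false := by simpa using h
    show (d.insert k []).insert k (f ((d.insert k []).getD k [])) = d.insert k (f (d.getD k []))
    rw [PySem.Dict.getD_insert_self, PySem.Dict.getD_of_not_contains d [] h']
    apply PySem.Dict.ext
    rw [PySem.Dict.items_insert_of_contains _ _ (PySem.Dict.contains_insert_self d k []),
        PySem.Dict.items_insert_of_not_contains _ _ h',
        PySem.Dict.items_insert_of_not_contains _ _ h', List.map_append]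
    have : ∀ p ∈ d.items, (if (p.1 == k) = true then (k, f []) else p) = p := by
      intro p hp
      have : (p.1 == k) = false := by
        by_contra hc
        have hpk : p.1 = k := by simpa using hc
        have : d.contains k = true := by
          have hd : d = PySem.Dict.mk d.items := rfl
          rw [hd, PySem.Dict.contains_mk]
          exact List.any_eq_true.mpr ⟨p, hp, by simp [hpk]⟩
        simp [h'] at this
      simp [this]
    rw [List.map_congr_left this]
    simp

-- B's setdefault loop builds exactly the first-occurrence keys, each mapped to []
lemma pvSetdefault_loop :
    ∀ (xs : List (Int × Int × Int)) (S : List Int),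
      (xs.foldl (fun d r => d.setdefault r.1 ([] : List (Int × Int)))
          (PySem.Dict.mk (S.map (fun k => (k, ([] : List (Int × Int))))))).items
        = (PySem.Set.update S (xs.map (fun r => r.1))).map (fun k => (k, [])) := by
  intro xs
  induction xs with
  | nil => intro S; simp [PySem.Set.update]
  | cons r rs ih =>
    intro S
    rw [List.foldl_cons, List.map_cons]
    have hupd : PySem.Set.update S (r.1 :: rs.map (fun r => r.1))
        = PySem.Set.update (PySem.Set.add S r.1) (rs.map (fun r => r.1)) := by
      simp [PySem.Set.update]
    rw [hupd]
    by_cases hmem : r.1 ∈ S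
    · have hc : (PySem.Dict.mk (S.map (fun k => (k, ([] : List (Int × Int)))))).contains r.1 = true := by
        rw [PySem.Dict.contains_mk, List.any_map, List.any_eq_true]
        exact ⟨r.1, hmem, by simp⟩
      rw [PySem.Dict.setdefault_of_contains _ _ hc]
      have hadd : PySem.Set.add S r.1 = S := by
        simp [PySem.Set.add, PySem.Set.contains, hmem]
      rw [hadd, ih]
    · have hc : (PySem.Dict.mk (S.map (fun k => (k, ([] : List (Int × Int)))))).contains r.1 = false := by
        rw [PySem.Dict.contains_mk, List.any_map]
        simp only [Bool.eq_false_iff, ne_eq, List.any_eq_true, not_exists, not_and]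
        intro z hz
        simp only [Function.comp]
        intro hb
        have hzr : z = r.1 := by simpa using hb
        exact hmem (hzr ▸ hz)
      rw [PySem.Dict.setdefault_of_not_contains _ _ hc]
      have hins : (PySem.Dict.mk (S.map (fun k => (k, ([] : List (Int × Int)))))).insert r.1 []
          = PySem.Dict.mk ((S ++ [r.1]).map (fun k => (k, []))) := by
        apply PySem.Dict.ext
        rw [PySem.Dict.items_insert_of_not_contains _ _ hc]
        simp
      have hadd : PySem.Set.add S r.1 = S ++ [r.1] := by
        simp [PySem.Set.add, PySem.Set.contains, hmem]
      rw [hins, hadd, ih]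

-- value lookup in a dict of shape mk (ks.map (k, v k))
lemma pvGetD_mk_map (ks : List Int) (v : Int → List (Int × Int)) (k : Int)
    (hnd : ks.Nodup) (hk : k ∈ ks) :
    (PySem.Dict.mk (ks.map (fun k => (k, v k)))).getD k [] = v k := by
  induction ks with
  | nil => cases hk
  | cons a as ih =>
    rw [List.nodup_cons] at hnd
    rcases List.mem_cons.mp hk with rfl | hk'
    · apply PySem.Dict.getD_of_get?_eq_some
      rw [List.map_cons, PySem.Dict.get?_mk_cons]
      simp
    · have ha : (a == k) = false := by
        simp only [beq_eq_false_iff_ne, ne_eq]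
        rintro rfl; exact hnd.1 hk'
      have := ih hnd.2 hk'
      rw [PySem.Dict.getD_eq_get?_getD] at this ⊢
      rw [List.map_cons, PySem.Dict.get?_mk_cons, ha]
      simpa using this

-- B's sweep loop, itemized: each coordinate's slot folds over its own filtered sublist
lemma pvModLoop :
    ∀ (L : List (Int × Int × Int)) (ks : List Int) (v : Int → List (Int × Int)),
      ks.Nodup → (∀ r ∈ L, r.1 ∈ ks) →
      (L.foldl (fun d r => d.modify r.1 [] (fun lst => pvSweepStep lst r.2.1 r.2.2))
          (PySem.Dict.mk (ks.map (fun k => (k, v k))))).items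
        = ks.map (fun k => (k, (L.filter (fun r => r.1 == k)).foldl
              (fun lst r => pvSweepStep lst r.2.1 r.2.2) (v k))) := by
  intro L
  induction L with
  | nil => intro ks v _ _; simp
  | cons r rs ih =>
    intro ks v hnd hmem
    have hrk : r.1 ∈ ks := hmem r (List.mem_cons_self ..)
    have hc : (PySem.Dict.mk (ks.map (fun k => (k, v k)))).contains r.1 = true := by
      rw [PySem.Dict.contains_mk, List.any_map, List.any_eq_true]
      exact ⟨r.1, hrk, by simp⟩
    rw [List.foldl_cons]
    have hmod : (PySem.Dict.mk (ks.map (fun k => (k, v k)))).modify r.1 []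
          (fun lst => pvSweepStep lst r.2.1 r.2.2)
        = PySem.Dict.mk (ks.map (fun k => (k,
            (if k = r.1 then pvSweepStep (v k) r.2.1 r.2.2 else v k)))) := by
      apply PySem.Dict.ext
      show ((PySem.Dict.mk (ks.map (fun k => (k, v k)))).insert r.1 _).items = _
      rw [PySem.Dict.items_insert_of_contains _ _ hc,
          pvGetD_mk_map ks v r.1 hnd hrk, List.map_map]
      apply List.map_congr_left
      intro a _
      by_cases har : a = r.1
      · subst har; simp
      · simp [har]
    rw [hmod, ih ks _ hnd (fun z hz => hmem z (List.mem_cons_of_mem _ hz))]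
    apply List.map_congr_left
    intro a _
    by_cases har : a = r.1
    · subst har
      simp
    · have : (r.1 == a) = false := by simp; exact fun e => har e.symm
      simp [this, har]

-- A's merge loop over the dict's own keys maps merge_intervals over the values
lemma pvMergeLoopAux :
    ∀ (ks : List Int) (pre : List (Int × List (Int × Int))) (v : Int → List (Int × Int)),
      (pre.map Prod.fst ++ ks).Nodup →
      (ks.foldl (fun d k => d.insert k (merge_intervals (d.getD k [])))
          (PySem.Dict.mk (pre ++ ks.map (fun k => (k, v k))))).items
        = pre ++ ks.map (fun k => (k, merge_intervals (v k))) := by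
  intro ks
  induction ks with
  | nil => intro pre v _; simp
  | cons k0 ks' ih =>
    intro pre v hnd
    have hnotpre : k0 ∉ pre.map Prod.fst := by
      intro hmem
      rw [List.nodup_append] at hnd
      exact hnd.2.2 k0 hmem k0 (List.mem_cons_self ..) rfl
    have hget : (PySem.Dict.mk (pre ++ (k0 :: ks').map (fun k => (k, v k)))).getD k0 [] = v k0 := by
      apply PySem.Dict.getD_of_get?_eq_some
      rw [pvGet?_mk_append _ _ _ hnotpre, List.map_cons, PySem.Dict.get?_mk_cons]
      simp
    have hc : (PySem.Dict.mk (pre ++ (k0 :: ks').map (fun k => (k, v k)))).contains k0 = true := by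
      rw [PySem.Dict.contains_eq_isSome_get?, pvGet?_mk_append _ _ _ hnotpre,
          List.map_cons, PySem.Dict.get?_mk_cons]
      simp
    have hk0ks' : k0 ∉ ks' := by
      have := List.nodup_append.mp hnd
      exact (List.nodup_cons.mp this.2.1).1
    rw [List.foldl_cons]
    have hins : (PySem.Dict.mk (pre ++ (k0 :: ks').map (fun k => (k, v k)))).insert k0
          (merge_intervals ((PySem.Dict.mk (pre ++ (k0 :: ks').map (fun k => (k, v k)))).getD k0 []))
        = PySem.Dict.mk ((pre ++ [(k0, merge_intervals (v k0))]) ++ ks'.map (fun k => (k, v k))) := by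
      apply PySem.Dict.ext
      rw [hget, PySem.Dict.items_insert_of_contains _ _ hc]
      show (pre ++ ((k0, v k0) :: ks'.map (fun k => (k, v k)))).map _ = _
      rw [List.map_append, List.map_cons]
      have hpre : pre.map (fun p => if (p.1 == k0) = true then (k0, merge_intervals (v k0)) else p)
          = pre := by
        have h : ∀ p ∈ pre, (if (p.1 == k0) = true then (k0, merge_intervals (v k0)) else p) = id p := by
          intro p hp
          have : (p.1 == k0) = false := by
            simp only [beq_eq_false_iff_ne, ne_eq]
            intro e; exact hnotpre (e ▸ List.mem_map_of_mem hp)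
          simp [this]
        rw [List.map_congr_left h, List.map_id]
      have htail : (ks'.map (fun k => (k, v k))).map
            (fun p => if (p.1 == k0) = true then (k0, merge_intervals (v k0)) else p)
          = ks'.map (fun k => (k, v k)) := by
        rw [List.map_map]
        apply List.map_congr_left
        intro a ha
        have har : a ≠ k0 := by rintro rfl; exact hk0ks' ha
        simp [har]
      rw [hpre, htail]
      simp
    rw [hins, ih (pre ++ [(k0, merge_intervals (v k0))]) v
        (by simpa [List.append_assoc] using hnd)]
    simp

-- grouped values of A's first loop
lemma pvGroup_getD (roadworks : List (Int × Int × Int)) (k : Int) :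
    (roadworks.foldl (fun d r =>
        let d' := if d.contains r.1 then d else d.insert r.1 ([] : List (Int × Int))
        d'.modify r.1 [] (fun l => l ++ [(r.2.1, r.2.2)])) PySem.Dict.empty).getD k []
      = (roadworks.filter (fun r => r.1 == k)).map pvG := by
  have hfe : (fun (d : PySem.Dict Int (List (Int × Int))) (r : Int × Int × Int) =>
        let d' := if d.contains r.1 then d else d.insert r.1 ([] : List (Int × Int))
        d'.modify r.1 [] (fun l => l ++ [(r.2.1, r.2.2)]))
      = (fun d r => d.modify r.1 [] (fun l => l ++ [(r.2.1, r.2.2)])) := by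
    funext d r
    exact pvGuard_modify d r.1 _
  rw [hfe]
  have hmap : roadworks.foldl (fun d r => d.modify r.1 [] (fun l => l ++ [(r.2.1, r.2.2)]))
        PySem.Dict.empty
      = (roadworks.map (fun r => (r.1, pvG r))).foldl
          (fun d p => d.modify p.1 [] (fun l => l ++ [p.2])) PySem.Dict.empty := by
    rw [List.foldl_map]
    rfl
  rw [hmap, PySem.Dict.getD_foldl_modify_append, List.filter_map, List.map_map]
  simp [PySem.Dict.getD_empty, Function.comp_def]

lemma pvGroup_keys (roadworks : List (Int × Int × Int)) :
    (roadworks.foldl (fun d r =>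
        let d' := if d.contains r.1 then d else d.insert r.1 ([] : List (Int × Int))
        d'.modify r.1 [] (fun l => l ++ [(r.2.1, r.2.2)])) PySem.Dict.empty).keys
      = PySem.Set.ofList (roadworks.map (fun r => r.1)) := by
  have hfe : (fun (d : PySem.Dict Int (List (Int × Int))) (r : Int × Int × Int) =>
        let d' := if d.contains r.1 then d else d.insert r.1 ([] : List (Int × Int))
        d'.modify r.1 [] (fun l => l ++ [(r.2.1, r.2.2)]))
      = (fun d r => d.modify r.1 [] (fun l => l ++ [(r.2.1, r.2.2)])) := by
    funext d r
    exact pvGuard_modify d r.1 _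
  rw [hfe, PySem.Dict.keys_foldl_modify_key roadworks (fun r => r.1) []
      (fun _ r => (fun l => l ++ [(r.2.1, r.2.2)]))]
  rw [PySem.Dict.keys_empty, PySem.Set.ofList_eq_foldl]
  rfl

lemma pvGroup_nodup (roadworks : List (Int × Int × Int)) :
    (roadworks.foldl (fun d r =>
        let d' := if d.contains r.1 then d else d.insert r.1 ([] : List (Int × Int))
        d'.modify r.1 [] (fun l => l ++ [(r.2.1, r.2.2)])) PySem.Dict.empty).keys.Nodup := by
  have hfe : (fun (d : PySem.Dict Int (List (Int × Int))) (r : Int × Int × Int) =>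
        let d' := if d.contains r.1 then d else d.insert r.1 ([] : List (Int × Int))
        d'.modify r.1 [] (fun l => l ++ [(r.2.1, r.2.2)]))
      = (fun d r => d.modify r.1 [] (fun l => l ++ [(r.2.1, r.2.2)])) := by
    funext d r
    exact pvGuard_modify d r.1 _
  rw [hfe]
  exact PySem.Dict.nodup_keys_foldl_modify_key roadworks (fun r => r.1) [] _ _ (by simp)

-- ===== VERDICT (by name: the statement is the Claim_ definition above) =====
theorem populate_blocked_intervals_spec : Claim_equal_populate_blocked_intervals := by
  intro roadworks _
  unfold Spec_populate_blocked_intervals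
  set K := PySem.Set.ofList (roadworks.map (fun r => r.1)) with hK
  -- A's side
  unfold populate_blocked_intervals
  set bi := roadworks.foldl (fun d r =>
      let d' := if d.contains r.1 then d else d.insert r.1 ([] : List (Int × Int))
      d'.modify r.1 [] (fun l => l ++ [(r.2.1, r.2.2)])) PySem.Dict.empty with hbi
  have hnd : bi.keys.Nodup := pvGroup_nodup roadworks
  have hkeys : bi.keys = K := pvGroup_keys roadworks
  have hitems : bi.items = K.map (fun k => (k, (roadworks.filter (fun r => r.1 == k)).map pvG)) := by
    rw [pvItems_char bi [] hnd, hkeys]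
    apply List.map_congr_left
    intro k _
    rw [pvGroup_getD roadworks k]
  have hbi_mk : bi = PySem.Dict.mk (K.map (fun k =>
      (k, (roadworks.filter (fun r => r.1 == k)).map pvG))) := by
    apply PySem.Dict.ext; exact hitems
  have hAn : (bi.keys.foldl (fun d k => d.insert k (merge_intervals (d.getD k []))) bi).items
      = K.map (fun k => (k, merge_intervals ((roadworks.filter (fun r => r.1 == k)).map pvG))) := by
    rw [hkeys, hbi_mk]
    have := pvMergeLoopAux K [] (fun k => (roadworks.filter (fun r => r.1 == k)).map pvG)
      (by simp only [List.map_nil, List.nil_append]; rw [hK]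
          exact PySem.Set.nodup_ofList (roadworks.map (fun r => r.1)))
    simpa using this
  rw [hAn]
  -- B's side
  unfold populate_blocked_intervals_alt
  have hd0 : (roadworks.foldl (fun d r => d.setdefault r.1 ([] : List (Int × Int)))
        PySem.Dict.empty)
      = PySem.Dict.mk (K.map (fun k => (k, []))) := by
    apply PySem.Dict.ext
    have h0 : (PySem.Dict.empty : PySem.Dict Int (List (Int × Int)))
        = PySem.Dict.mk (([] : List Int).map (fun k => (k, []))) := rfl
    rw [h0, pvSetdefault_loop roadworks []]
    have : PySem.Set.update ([] : List Int) (roadworks.map (fun r => r.1)) = K := by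
      rw [hK, PySem.Set.ofList_eq_foldl]; rfl
    rw [this]
  rw [hd0]
  set srt := PySem.List.sorted2 roadworks (fun r => r.1) (fun r => r.2.1) false with hsrt
  have hmemsrt : ∀ r ∈ srt, r.1 ∈ K := by
    intro r hr
    have : r ∈ roadworks := (PySem.List.sorted2_perm roadworks _ _ false).mem_iff.mp hr
    rw [hK, PySem.Set.mem_ofList]
    exact List.mem_map_of_mem this
  rw [pvModLoop srt K (fun _ => [])
      (by rw [hK]; exact PySem.Set.nodup_ofList (roadworks.map (fun r => r.1))) hmemsrt]
  -- per-coordinate agreement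
  apply List.map_congr_left
  intro k _
  have hchain : merge_intervals ((roadworks.filter (fun r => r.1 == k)).map pvG)
      = (srt.filter (fun r => r.1 == k)).foldl (fun lst r => pvSweepStep lst r.2.1 r.2.2) [] := by
    rw [pvMerge_eq_sweep, ← pvStable k roadworks, ← hsrt]
    rw [List.foldl_map]
    rfl
  rw [hchain]
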